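-- pv_equiv track=rewrite | github.com/rakhadaffasahuleka/tebal-perkerasan-kaku-mdpj2017 | kumfungsi.py | divide_into_lists
-- ===== SOURCE A (Python) =====
-- def divide_into_lists(data_list, data_per_list):
--     lists = []
--     idx = 0
--
--     # Membagi data berdasarkan jumlah data per list yang diinputkan oleh pengguna
--     for num_data in data_per_list:
--         current_list = data_list[idx:idx + num_data]
--         lists.append(current_list)
--         idx += num_data
--
--     return lists
-- ===== SOURCE B (Python) =====
-- def divide_into_lists(data_list, data_per_list):
--     # phase 1: boundary table (offsets[i] = sum of the first i sizes)
--     offsets = [0]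
--     for size in data_per_list:
--         offsets.append(offsets[-1] + size)
--     # phase 2: one slicing comprehension over the precomputed boundaries
--     return [data_list[offsets[i]:offsets[i + 1]] for i in range(len(data_per_list))]
-- ===== Notes on version B (the rewrite author's own statement) =====
-- stated objective: alternative
-- what changed: B precomputes the table of slice boundaries (prefix sums of the sizes) and builds the result as one slicing comprehension over that table, instead of threading a running idx accumulator through a loop that appends.
import Mathlib
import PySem

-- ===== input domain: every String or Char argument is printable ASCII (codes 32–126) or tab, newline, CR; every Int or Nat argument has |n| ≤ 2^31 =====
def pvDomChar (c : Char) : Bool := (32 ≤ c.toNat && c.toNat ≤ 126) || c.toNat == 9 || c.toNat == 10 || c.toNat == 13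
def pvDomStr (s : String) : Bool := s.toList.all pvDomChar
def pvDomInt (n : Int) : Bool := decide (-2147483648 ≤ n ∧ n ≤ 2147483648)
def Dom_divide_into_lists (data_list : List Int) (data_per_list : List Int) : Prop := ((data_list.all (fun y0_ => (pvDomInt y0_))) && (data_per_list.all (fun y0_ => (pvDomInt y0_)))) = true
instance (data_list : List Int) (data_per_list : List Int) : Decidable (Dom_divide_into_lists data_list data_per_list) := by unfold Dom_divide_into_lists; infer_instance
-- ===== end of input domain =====

-- B replaces A's running-index loop by a precomputed prefix-sum boundary table and one
-- slicing comprehension over it (alternative decomposition; not claimed faster).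

-- ===== PORT A =====
-- loop state: (lists, idx); for num_data in data_per_list: append data_list[idx:idx+num_data]; idx += num_data
def divide_into_lists (data_list : List Int) (data_per_list : List Int) : List (List Int) :=
  (data_per_list.foldl
    (fun (st : List (List Int) × Int) num_data =>
      (st.1 ++ [PySem.List.slice data_list (some st.2) (some (st.2 + num_data))], st.2 + num_data))
    (([] : List (List Int)), (0 : Int))).1

-- ===== PORT B =====
-- offsets = [0]; for size: offsets.append(offsets[-1] + size); then one slicing comprehension
-- (offsets is never empty, so the .getD 0 default behind offsets[-1] is never taken)
def divide_into_lists_alt (data_list : List Int) (data_per_list : List Int) : List (List Int) :=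
  let offsets := data_per_list.foldl
    (fun offsets size => offsets ++ [(PySem.List.pyGet? offsets (-1)).getD 0 + size])
    [(0 : Int)]
  (List.range data_per_list.length).map (fun i =>
    PySem.List.slice data_list (some (offsets.getD i 0)) (some (offsets.getD (i + 1) 0)))

-- ===== PRECONDITION & SPEC =====
def Spec_divide_into_lists (data_list : List Int) (data_per_list : List Int) (out : List (List Int)) : Prop := out = divide_into_lists_alt data_list data_per_list
instance (data_list : List Int) (data_per_list : List Int) (out : List (List Int)) : Decidable (Spec_divide_into_lists data_list data_per_list out) := by unfold Spec_divide_into_lists; infer_instance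

-- ===== CLAIM (what is proved, stated in full; the proofs are below) =====
def Claim_equal_divide_into_lists : Prop := ∀ (data_list : List Int) (data_per_list : List Int), Dom_divide_into_lists data_list data_per_list → Spec_divide_into_lists data_list data_per_list (divide_into_lists data_list data_per_list)

-- ===== LEMMAS AND PROOFS =====

-- reading the boundary table at position i < n+1 gives the i-th prefix sum
theorem pv_offsets_getD (dpl : List Int) (n i : ℕ) (h : i < n + 1) :
    (((List.range (n + 1)).map (fun j => (dpl.take j).sum)).getD i 0) = (dpl.take i).sum := by
  rw [List.getD_eq_getElem?_getD, List.getElem?_map]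
  simp [h]

-- A's fold from an arbitrary accumulator and start offset, characterised by prefix sums
theorem pv_foldl_eq (dl : List Int) (dpl : List Int) (acc : List (List Int)) (s : Int) :
    (dpl.foldl
      (fun (st : List (List Int) × Int) num =>
        (st.1 ++ [PySem.List.slice dl (some st.2) (some (st.2 + num))], st.2 + num))
      (acc, s)).1
    = acc ++ (List.range dpl.length).map (fun i =>
        PySem.List.slice dl (some (s + (dpl.take i).sum)) (some (s + (dpl.take (i + 1)).sum))) := by
  induction dpl generalizing acc s with
  | nil => simp
  | cons num rest ih =>
    simp only [List.foldl_cons, List.length_cons]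
    rw [ih]
    rw [List.range_succ_eq_map]
    simp only [List.map_cons, List.map_map]
    simp only [List.append_assoc, List.singleton_append]
    congr 2
    · congr 2 <;> simp
    · apply List.map_congr_left
      intro i _
      simp only [Function.comp_apply, List.take_succ_cons, List.sum_cons]
      congr 2 <;> ring

-- B's boundary-table loop, from an arbitrary nonempty prefix, equals the prefix-sum table
theorem pv_offsets_foldl (dpl : List Int) (os : List Int) (s : Int) :
    dpl.foldl
      (fun offsets size => offsets ++ [(PySem.List.pyGet? offsets (-1)).getD 0 + size])
      (os ++ [s])
    = os ++ (List.range (dpl.length + 1)).map (fun i => s + (dpl.take i).sum) := by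
  induction dpl generalizing os s with
  | nil => simp
  | cons size rest ih =>
    simp only [List.foldl_cons, PySem.List.pyGet?_neg_one_append_singleton, Option.getD_some]
    rw [ih (os ++ [s]) (s + size)]
    simp only [List.length_cons, List.append_assoc, List.singleton_append,
      List.range_succ_eq_map, List.map_cons, List.map_map]
    congr 1 <;> simp [List.take_succ_cons]
    intro a _
    ring

theorem divide_into_lists_eq (dl dpl : List Int) :
    divide_into_lists dl dpl = divide_into_lists_alt dl dpl := by
  unfold divide_into_lists divide_into_lists_alt
  rw [pv_foldl_eq]
  have hoff := pv_offsets_foldl dpl [] 0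
  simp only [List.nil_append] at hoff ⊢
  rw [hoff]
  simp only [zero_add]
  apply List.map_congr_left
  intro i hi
  rw [List.mem_range] at hi
  rw [pv_offsets_getD dpl dpl.length i (by omega),
      pv_offsets_getD dpl dpl.length (i + 1) (by omega)]

-- ===== VERDICT (by name: the statement is the Claim_ definition above) =====
theorem divide_into_lists_spec : Claim_equal_divide_into_lists := by
  intro dl dpl _
  exact divide_into_lists_eq dl dpl
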